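-- pv_equiv track=rewrite | github.com/tenislinhares-design/tenis-linhares-torneio | app.py | round_names
-- ===== SOURCE A (Python) =====
-- import math
--
-- def round_names(size):
--     names = {
--         2: ["Final"],
--         4: ["Semifinal", "Final"],
--         8: ["Quartas de final", "Semifinal", "Final"],
--         16: ["Oitavas de final", "Quartas de final", "Semifinal", "Final"],
--         32: ["32 avos", "Oitavas de final", "Quartas de final", "Semifinal", "Final"],
--     }
--     return names.get(size, [f"Rodada {i+1}" for i in range(int(math.log2(size)))])
-- ===== SOURCE B (Python) =====
-- ROUND_FROM_FINAL = {1: "Final", 2: "Semifinal", 3: "Quartas de final",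
--                     4: "Oitavas de final", 5: "32 avos"}
--
-- def round_names(size):
--     # Halve size down to 1, counting rounds and tracking whether it is an exact
--     # power of two; build the named rounds back-to-front from the final.
--     s = size
--     k = 0
--     power = True
--     while s > 1:
--         if s % 2:
--             power = False
--         s //= 2
--         k += 1
--     if power and s == 1 and 1 <= k <= 5:
--         return [ROUND_FROM_FINAL[r] for r in range(k, 0, -1)]
--     return [f"Rodada {i+1}" for i in range(k)]
-- ===== Notes on version B (the rewrite author's own statement) =====
-- stated objective: alternative
-- what changed: Replaces the dict of five full name lists and the math.log2 fallback with a single halving loop that counts rounds and detects an exact power of two via remainders, then builds the named rounds back-to-front from the final via a per-round-name table; no math.log2 is used.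
import Mathlib
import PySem

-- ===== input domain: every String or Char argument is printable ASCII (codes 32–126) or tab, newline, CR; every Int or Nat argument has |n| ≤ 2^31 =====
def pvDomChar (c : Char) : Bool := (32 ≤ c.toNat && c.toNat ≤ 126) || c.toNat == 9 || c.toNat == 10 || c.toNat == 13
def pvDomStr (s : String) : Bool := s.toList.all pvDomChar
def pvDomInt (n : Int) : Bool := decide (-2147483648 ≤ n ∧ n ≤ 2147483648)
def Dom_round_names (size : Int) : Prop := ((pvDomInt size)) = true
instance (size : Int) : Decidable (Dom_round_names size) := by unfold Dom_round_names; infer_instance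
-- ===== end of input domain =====

-- B replaces A's dict of five full name lists + math.log2 fallback by one halving loop that counts
-- rounds and detects an exact power of two, building the named rounds back-to-front from the final;
-- objective: alternative.

-- ===== PORT A =====
-- int(math.log2(size)) for 1 ≤ size ≤ 2^31: exact (floor of log2; double rounding cannot cross an
-- integer in this range), modelled by Nat.log2 on size.toNat.
def pvIntLog2 (size : Int) : Int := Int.ofNat (Nat.log2 size.toNat)

def round_names (size : Int) : List String :=
  let names : PySem.Dict Int (List String) := PySem.Dict.ofList
    [(2, ["Final"]),
     (4, ["Semifinal", "Final"]),
     (8, ["Quartas de final", "Semifinal", "Final"]),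
     (16, ["Oitavas de final", "Quartas de final", "Semifinal", "Final"]),
     (32, ["32 avos", "Oitavas de final", "Quartas de final", "Semifinal", "Final"])]
  PySem.Dict.getD names size
    ((PySem.List.pyRange 0 (pvIntLog2 size) 1).map (fun i => "Rodada " ++ PySem.Int.toStr (i + 1)))

-- ===== PORT B =====
def pvRoundFromFinal : PySem.Dict Int String := PySem.Dict.ofList
  [(1, "Final"), (2, "Semifinal"), (3, "Quartas de final"),
   (4, "Oitavas de final"), (5, "32 avos")]

-- the 'while s > 1' loop of Source B (state s, k, power); fuel s.toNat suffices since s at least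
-- halves each iteration, so the fuel guard never changes the computed value.
def pvLoopAux : Nat → Int → Int → Bool → Int × Int × Bool
  | 0, s, k, power => (s, k, power)
  | fuel + 1, s, k, power =>
    if 1 < s then
      pvLoopAux fuel (PySem.Int.floordiv s 2) (k + 1) (power && (PySem.Int.mod s 2 == 0))
    else (s, k, power)

def pvLoop (s k : Int) (power : Bool) : Int × Int × Bool := pvLoopAux s.toNat s k power

def round_names_alt (size : Int) : List String :=
  match pvLoop size 0 true with
  | (s, k, power) =>
  if power && (s == 1) && decide (1 ≤ k) && decide (k ≤ 5) then
    -- ROUND_FROM_FINAL[r]: the KeyError default "" is never reached (1 ≤ r ≤ k ≤ 5 here)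
    (PySem.List.pyRange k 0 (-1)).map (fun r => PySem.Dict.getD pvRoundFromFinal r "")
  else
    (PySem.List.pyRange 0 k 1).map (fun i => "Rodada " ++ PySem.Int.toStr (i + 1))

-- ===== PRECONDITION & SPEC =====
-- Pre_ excludes non-positive sizes, on which A raises ValueError from math.log2.
def Pre_round_names (size : Int) : Prop := 1 ≤ size
instance (size : Int) : Decidable (Pre_round_names size) := by unfold Pre_round_names; infer_instance
def pvWitness_round_names : Int := (16)

def Spec_round_names (size : Int) (out : List String) : Prop := out = round_names_alt size
instance (size : Int) (out : List String) : Decidable (Spec_round_names size out) := by unfold Spec_round_names; infer_instance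

-- ===== CLAIM (what is proved, stated in full; the proofs are below) =====
def Claim_equal_round_names : Prop := ∀ (size : Int), Dom_round_names size → Pre_round_names size → Spec_round_names size (round_names size)

-- ===== LEMMAS AND PROOFS =====

-- the halving loop ends at s = 1 having added log2 n rounds, and power records exact power-of-two
theorem pvLoopAux_spec (fuel : Nat) : ∀ (n : Nat), 1 ≤ n → n ≤ fuel → ∀ (k : Int) (p : Bool),
    pvLoopAux fuel (n : Int) k p = (1, k + (Nat.log2 n : Int), p && (n == 2 ^ Nat.log2 n)) := by
  induction fuel with
  | zero => intro n h1 h2; omega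
  | succ fuel ih =>
    intro n h1 h2 k p
    by_cases hn : 2 ≤ n
    · have hlt : 1 < (n : Int) := by exact_mod_cast hn
      have hdiv : PySem.Int.floordiv (n : Int) 2 = ((n / 2 : Nat) : Int) := by
        exact_mod_cast PySem.Int.floordiv_natCast n 2
      have hmod : PySem.Int.mod (n : Int) 2 = ((n % 2 : Nat) : Int) := by
        exact_mod_cast PySem.Int.mod_natCast n 2
      have hrec := ih (n / 2) (by omega) (by omega) (k + 1) (p && (PySem.Int.mod (n : Int) 2 == 0))
      have hlog : Nat.log2 n = Nat.log2 (n / 2) + 1 := by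
        rw [Nat.log2_def]; simp [hn]
      have hb : ((PySem.Int.mod (n : Int) 2 == 0) : Bool) = (n % 2 == 0) := by
        rw [hmod]
        rcases Nat.mod_two_eq_zero_or_one n with h | h <;> rw [h] <;> decide
      have hp : 1 ≤ 2 ^ Nat.log2 (n / 2) := Nat.one_le_two_pow
      have hpow : ((n % 2 == 0) && ((n / 2 : Nat) == 2 ^ Nat.log2 (n / 2)))
          = (n == 2 ^ (Nat.log2 (n / 2) + 1)) := by
        rw [show (2:Nat) ^ (Nat.log2 (n / 2) + 1) = 2 ^ Nat.log2 (n / 2) * 2 from pow_succ _ _]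
        rw [Bool.eq_iff_iff]
        simp only [Bool.and_eq_true, beq_iff_eq]
        omega
      have hk : (k + 1 + (Nat.log2 (n / 2) : Int))
          = k + ((Nat.log2 (n / 2) + 1 : Nat) : Int) := by push_cast; ring
      rw [pvLoopAux, if_pos hlt, hdiv, hrec, hb, hlog, Bool.and_assoc, hpow, hk]
    · have hn1 : n = 1 := by omega
      subst hn1
      rw [pvLoopAux, if_neg (by norm_num)]
      simp [Nat.log2_def]

theorem pvLoop_spec (n : Nat) (h1 : 1 ≤ n) (k : Int) (p : Bool) :
    pvLoop (n : Int) k p = (1, k + (Nat.log2 n : Int), p && (n == 2 ^ Nat.log2 n)) := by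
  unfold pvLoop
  rw [Int.toNat_natCast]
  exact pvLoopAux_spec n n h1 le_rfl k p

-- ===== VERDICT (by name: the statement is the Claim_ definition above) =====
theorem round_names_spec : Claim_equal_round_names := by
  intro size hdom hpre
  unfold Spec_round_names
  obtain ⟨n, rfl⟩ : ∃ n : Nat, size = (n : Int) := ⟨size.toNat, by unfold Pre_round_names at hpre; omega⟩
  have hn : 1 ≤ n := by unfold Pre_round_names at hpre; exact_mod_cast hpre
  unfold round_names_alt
  rw [pvLoop_spec n hn]
  show round_names (n : Int) =
    if ((true && ((n : Nat) == 2 ^ Nat.log2 n)) && (((1 : Int)) == 1)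
        && decide (1 ≤ (0 : Int) + (Nat.log2 n : Int)) && decide ((0 : Int) + (Nat.log2 n : Int) ≤ 5))
    then (PySem.List.pyRange ((0 : Int) + (Nat.log2 n : Int)) 0 (-1)).map
          (fun r => PySem.Dict.getD pvRoundFromFinal r "")
    else (PySem.List.pyRange 0 ((0 : Int) + (Nat.log2 n : Int)) 1).map
          (fun i => "Rodada " ++ PySem.Int.toStr (i + 1))
  by_cases hc : n = 2 ^ Nat.log2 n ∧ 1 ≤ Nat.log2 n ∧ Nat.log2 n ≤ 5
  · obtain ⟨hpow, hlo, hhi⟩ := hc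
    set m := Nat.log2 n with hm
    clear_value m
    interval_cases m <;> norm_num at hpow <;> subst hpow <;> decide
  · have hcond : ((true && ((n : Nat) == 2 ^ Nat.log2 n) && (((1:Int)) == 1)
        && decide (1 ≤ (0:Int) + (Nat.log2 n : Int))
        && decide ((0:Int) + (Nat.log2 n : Int) ≤ 5)) = false) := by
      by_cases hpow : n = 2 ^ Nat.log2 n
      · have hx : ¬ (1 ≤ Nat.log2 n ∧ Nat.log2 n ≤ 5) := fun hx => hc ⟨hpow, hx⟩
        have hbt : ((n : Nat) == 2 ^ Nat.log2 n) = true := beq_iff_eq.mpr hpow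
        rw [hbt]
        simp only [Bool.and_eq_false_iff]
        by_cases hlo : 1 ≤ Nat.log2 n
        · right; simp; omega
        · left; right; simp; omega
      · have hbf : ((n : Nat) == 2 ^ Nat.log2 n) = false := beq_eq_false_iff_ne.mpr hpow
        rw [hbf]
        simp
    have h2 : n ≠ 2 := by rintro rfl; exact hc (by decide)
    have h4 : n ≠ 4 := by rintro rfl; exact hc (by decide)
    have h8 : n ≠ 8 := by rintro rfl; exact hc (by decide)
    have h16 : n ≠ 16 := by rintro rfl; exact hc (by decide)
    have h32 : n ≠ 32 := by rintro rfl; exact hc (by decide)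
    have hb2 : (((2:Int)) == (n : Int)) = false := by rw [beq_eq_false_iff_ne]; omega
    have hb4 : (((4:Int)) == (n : Int)) = false := by rw [beq_eq_false_iff_ne]; omega
    have hb8 : (((8:Int)) == (n : Int)) = false := by rw [beq_eq_false_iff_ne]; omega
    have hb16 : (((16:Int)) == (n : Int)) = false := by rw [beq_eq_false_iff_ne]; omega
    have hb32 : (((32:Int)) == (n : Int)) = false := by rw [beq_eq_false_iff_ne]; omega
    rw [hcond]
    simp only [Bool.false_eq_true, if_false]
    simp [round_names, pvIntLog2, PySem.Dict.ofList, PySem.Dict.getD, PySem.Dict.get?,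
      PySem.Dict.update, PySem.Dict.insert, PySem.Dict.empty, List.find?,
      hb2, hb4, hb8, hb16, hb32]
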